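-- pv_equiv track=rewrite | github.com/akadjoker/Carla | Bin/Tes.py | get_average_line
-- ===== SOURCE A (Python) =====
-- def get_average_line(line_queue):
--     """Calcula a média móvel das linhas detectadas"""
--     if not line_queue:
--         return None
--
--     x1_sum = 0
--     y1_sum = 0
--     x2_sum = 0
--     y2_sum = 0
--
--     for line in line_queue:
--         x1_sum += line[0]
--         y1_sum += line[1]
--         x2_sum += line[2]
--         y2_sum += line[3]
--
--     count = len(line_queue)
--     x1_avg = x1_sum // count
--     y1_avg = y1_sum // count
--     x2_avg = x2_sum // count
--     y2_avg = y2_sum // count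
--
--     return [x1_avg, y1_avg, x2_avg, y2_avg]
-- ===== SOURCE B (Python) =====
-- def get_average_line(line_queue):
--     """Calcula a média móvel das linhas detectadas"""
--     if not line_queue:
--         return None
--
--     def vsum(q):
--         # divide-and-conquer tree reduction of the coordinate vectors
--         if len(q) == 1:
--             line = q[0]
--             return [line[0], line[1], line[2], line[3]]
--         mid = len(q) // 2
--         left = vsum(q[:mid])
--         right = vsum(q[mid:])
--         return [left[j] + right[j] for j in range(4)]
--
--     totals = vsum(line_queue)
--     count = len(line_queue)
--     return [t // count for t in totals]
-- ===== Notes on version B (the rewrite author's own statement) =====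
-- stated objective: alternative
-- what changed: Replaces the single linear pass threading four running totals with a divide-and-conquer tree reduction: the queue is split in halves, each half's coordinate-vector sum is computed recursively and the halves are combined element-wise, then the four totals are divided once; Pre_ excludes queues containing a line shorter than 4, on which both programs raise IndexError.
import Mathlib
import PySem

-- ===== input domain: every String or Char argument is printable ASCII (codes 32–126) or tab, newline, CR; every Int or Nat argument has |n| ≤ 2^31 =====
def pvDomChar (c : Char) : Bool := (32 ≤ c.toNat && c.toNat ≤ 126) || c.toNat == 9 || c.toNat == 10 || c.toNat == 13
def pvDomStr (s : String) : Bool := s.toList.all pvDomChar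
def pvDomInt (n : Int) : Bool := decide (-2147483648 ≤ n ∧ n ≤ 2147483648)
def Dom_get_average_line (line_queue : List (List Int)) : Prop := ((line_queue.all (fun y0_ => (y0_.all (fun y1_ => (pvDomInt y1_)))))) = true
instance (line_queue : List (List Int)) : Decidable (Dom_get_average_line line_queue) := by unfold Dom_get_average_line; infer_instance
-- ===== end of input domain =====

-- B replaces the linear pass threading four running totals by a divide-and-conquer
-- tree reduction of the coordinate vectors (split in halves, combine element-wise);
-- equivalence is proved on queues whose lines all have length ≥ 4 (otherwise both raise IndexError).

-- ===== PORT A =====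
-- the 'for line in line_queue' loop threading the four running sums
def pvLoopA : List (List Int) → Int → Int → Int → Int → Option (Int × Int × Int × Int)
  | [], a, b, c, d => some (a, b, c, d)
  | l :: rest, a, b, c, d =>
    match PySem.List.pyGet? l 0, PySem.List.pyGet? l 1, PySem.List.pyGet? l 2, PySem.List.pyGet? l 3 with
    | some x1, some y1, some x2, some y2 => pvLoopA rest (a + x1) (b + y1) (c + x2) (d + y2)
    | _, _, _, _ => none

def get_average_line (line_queue : List (List Int)) : Option (List Int) :=
  if line_queue = [] then none
  else
    match pvLoopA line_queue 0 0 0 0 with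
    | none => none
    | some (x1s, y1s, x2s, y2s) =>
      let count : Int := line_queue.length
      some [PySem.Int.floordiv x1s count, PySem.Int.floordiv y1s count,
            PySem.Int.floordiv x2s count, PySem.Int.floordiv y2s count]

-- ===== PORT B =====
-- vsum(q): divide-and-conquer; Python diverges on q = [] but never reaches it (vsum is
-- only applied to non-empty queues), so the port's [] branch returns none as a totalization guard.
def pvVSum (q : List (List Int)) : Option (List Int) :=
  if q.length = 1 then
    match q with
    | [] => none
    | line :: _ => do
      let a ← PySem.List.pyGet? line 0
      let b ← PySem.List.pyGet? line 1
      let c ← PySem.List.pyGet? line 2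
      let d ← PySem.List.pyGet? line 3
      pure [a, b, c, d]
  else if q.length = 0 then none   -- unreachable guard: Python vsum is never called on []
  else
    let mid : Int := PySem.Int.floordiv (q.length : Int) 2
    do
      let left ← pvVSum (PySem.List.slice q none (some mid))
      let right ← pvVSum (PySem.List.slice q (some mid) none)
      (PySem.List.pyRange 0 4 1).mapM
        (fun j => do
          let x ← PySem.List.pyGet? left j
          let y ← PySem.List.pyGet? right j
          pure (x + y))
termination_by q.length
decreasing_by
  · have : PySem.Int.floordiv (q.length : Int) 2 = ((q.length / 2 : Nat) : Int) :=
      PySem.Int.floordiv_natCast q.length 2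
    rw [this, PySem.List.slice_to_natCast]
    simp; omega
  · have : PySem.Int.floordiv (q.length : Int) 2 = ((q.length / 2 : Nat) : Int) :=
      PySem.Int.floordiv_natCast q.length 2
    rw [this, PySem.List.slice_from_natCast]
    simp; omega

def get_average_line_alt (line_queue : List (List Int)) : Option (List Int) :=
  if line_queue = [] then none
  else
    match pvVSum line_queue with
    | none => none
    | some totals =>
      let count : Int := line_queue.length
      some (totals.map (fun t => PySem.Int.floordiv t count))

-- ===== PRECONDITION & SPEC =====
-- Pre_ excludes queues containing a line shorter than 4: A (and B) raise IndexError there.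
def Pre_get_average_line (line_queue : List (List Int)) : Prop :=
  ∀ l ∈ line_queue, 4 ≤ l.length

instance (line_queue : List (List Int)) : Decidable (Pre_get_average_line line_queue) := by
  unfold Pre_get_average_line; infer_instance

def pvWitness_get_average_line : List (List Int) := [[1, 2, 3, 4], [3, 0, 5, 10]]

def Spec_get_average_line (line_queue : List (List Int)) (out : Option (List Int)) : Prop := out = get_average_line_alt line_queue
instance (line_queue : List (List Int)) (out : Option (List Int)) : Decidable (Spec_get_average_line line_queue out) := by unfold Spec_get_average_line; infer_instance

-- ===== CLAIM (what is proved, stated in full; the proofs are below) =====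
def Claim_equal_get_average_line : Prop := ∀ (line_queue : List (List Int)), Dom_get_average_line line_queue → Pre_get_average_line line_queue → Spec_get_average_line line_queue (get_average_line line_queue)

-- ===== LEMMAS AND PROOFS =====

-- pure column sum
def pvColS (q : List (List Int)) (j : Nat) : Int := (q.map (fun l => l.getD j 0)).sum

theorem pvGet_of_len (l : List Int) (j : Nat) (h : j < l.length) :
    PySem.List.pyGet? l (j : Int) = some (l.getD j 0) := by
  rw [PySem.List.pyGet?_natCast]
  simp [List.getD, List.getElem?_eq_getElem h]

theorem pvColS_append (q r : List (List Int)) (j : Nat) :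
    pvColS (q ++ r) j = pvColS q j + pvColS r j := by
  simp [pvColS]

theorem pvVSum_eq (q : List (List Int)) : q ≠ [] → (∀ l ∈ q, 4 ≤ l.length) →
    pvVSum q = some [pvColS q 0, pvColS q 1, pvColS q 2, pvColS q 3] := by
  fun_induction pvVSum q with
  | case1 h => intro hne _; exact absurd rfl hne
  | case2 line tail h =>
    intro _ hmem
    have htail : tail = [] := by
      simp at h; exact h
    subst htail
    have hl : 4 ≤ line.length := hmem line (by simp)
    have h0 := pvGet_of_len line 0 (by omega)
    have h1' := pvGet_of_len line 1 (by omega)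
    have h2 := pvGet_of_len line 2 (by omega)
    have h3 := pvGet_of_len line 3 (by omega)
    norm_num at h0 h1' h2 h3
    simp [h0, h1', h2, h3, pvColS, List.getD]
  | case3 x h1 h0 =>
    intro hne _
    exact absurd (List.eq_nil_of_length_eq_zero h0) hne
  | case4 x h1 h0 mid ih2 ih1 =>
    intro _ hmem
    have hlen2 : 2 ≤ x.length := by
      rcases Nat.lt_or_ge x.length 2 with hlt | hge
      · omega
      · exact hge
    have hmidv : mid = ((x.length / 2 : Nat) : Int) :=
      PySem.Int.floordiv_natCast x.length 2
    have hslL : PySem.List.slice x none (some mid) = x.take (x.length / 2) := by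
      rw [hmidv, PySem.List.slice_to_natCast]
    have hslR : PySem.List.slice x (some mid) none = x.drop (x.length / 2) := by
      rw [hmidv, PySem.List.slice_from_natCast]
    have hLne : x.take (x.length / 2) ≠ [] := by
      have hlen : (x.take (x.length / 2)).length = x.length / 2 := by
        simp [Nat.min_eq_left (Nat.div_le_self _ _)]
      intro hc; rw [hc] at hlen; simp at hlen; omega
    have hRne : x.drop (x.length / 2) ≠ [] := by
      have hlen : (x.drop (x.length / 2)).length = x.length - x.length / 2 := by simp
      intro hc; rw [hc] at hlen; simp at hlen; omega
    have hL := ih2 (by rw [hslL]; exact hLne)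
      (by rw [hslL]; exact fun l hm => hmem l (List.mem_of_mem_take hm))
    have hR := ih1 (by rw [hslR]; exact hRne)
      (by rw [hslR]; exact fun l hm => hmem l (List.mem_of_mem_drop hm))
    have hsplit : ∀ j : Nat, pvColS x j
        = pvColS (x.take (x.length / 2)) j + pvColS (x.drop (x.length / 2)) j := by
      intro j
      conv_lhs => rw [← List.take_append_drop (x.length / 2) x]
      exact pvColS_append _ _ j
    rw [hslL] at hL; rw [hslR] at hR
    rw [hslL, hslR, hL, hR]
    have hr4 : PySem.List.pyRange 0 4 1 = [0, 1, 2, 3] := by decide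
    rw [hr4]
    simp [List.mapM_cons, PySem.List.pyGet?, PySem.List.pyIdx?, pure, Option.bind,
          hsplit 0, hsplit 1, hsplit 2, hsplit 3]

theorem pvLoopA_eq (q : List (List Int)) (h : ∀ l ∈ q, 4 ≤ l.length) :
    ∀ a b c d, pvLoopA q a b c d =
      some (a + pvColS q 0, b + pvColS q 1, c + pvColS q 2, d + pvColS q 3) := by
  induction q with
  | nil => intro a b c d; simp [pvLoopA, pvColS]
  | cons l rest ih =>
    intro a b c d
    have hl : 4 ≤ l.length := h l (by simp)
    have h0 := pvGet_of_len l 0 (by omega)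
    have h1 := pvGet_of_len l 1 (by omega)
    have h2 := pvGet_of_len l 2 (by omega)
    have h3 := pvGet_of_len l 3 (by omega)
    norm_num at h0 h1 h2 h3
    rw [pvLoopA, h0, h1, h2, h3]
    dsimp only
    rw [ih (fun x hx => h x (by simp [hx]))]
    simp [pvColS, List.getD]
    refine ⟨by ring, by ring, by ring, by ring⟩

-- ===== VERDICT (by name: the statement is the Claim_ definition above) =====
theorem get_average_line_spec : Claim_equal_get_average_line := by
  intro q _ hpre
  unfold Spec_get_average_line get_average_line get_average_line_alt
  by_cases hq : q = []
  · simp [hq]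
  · simp only [hq, if_false]
    rw [pvLoopA_eq q hpre 0 0 0 0, pvVSum_eq q hq hpre]
    simp
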